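-- pv_equiv track=rewrite | github.com/eabumere/DHIS2_CHAT_DEMO | re_order.py | reorder_dhis2_metadata_fixed
-- ===== SOURCE A (Python) =====
-- from collections import OrderedDict
--
-- CORRECT_ORDER = [
--     "categoryOptions",
--     "categories",
--     "categoryCombos",
--     "categoryOptionCombos",
--     "dataElements",
--     "dataSets"
-- ]
--
-- def reorder_dhis2_metadata_fixed(payload):
--     """
--     Reorder DHIS2 metadata payload based on known inter-object dependencies.
--     """
--     ordered = OrderedDict()
--     for key in CORRECT_ORDER:
--         if key in payload:
--             ordered[key] = payload[key]
--     # Add any remaining keys not listed in CORRECT_ORDER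
--     for key in payload:
--         if key not in ordered:
--             ordered[key] = payload[key]
--     return ordered
-- ===== SOURCE B (Python) =====
-- from collections import OrderedDict
--
-- CORRECT_ORDER = [
--     "categoryOptions",
--     "categories",
--     "categoryCombos",
--     "categoryOptionCombos",
--     "dataElements",
--     "dataSets"
-- ]
--
-- def reorder_dhis2_metadata_fixed(payload):
--     """Single-pass bucket sort: drop each item into the bucket of its
--     CORRECT_ORDER position (unknown keys share the last bucket), then
--     concatenate the buckets."""
--     pos = {k: i for i, k in enumerate(CORRECT_ORDER)}
--     sentinel = len(CORRECT_ORDER)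
--     buckets = [[] for _ in range(sentinel + 1)]
--     for key, value in payload.items():
--         buckets[pos.get(key, sentinel)].append((key, value))
--     return OrderedDict(pair for bucket in buckets for pair in bucket)
-- ===== Notes on version B (the rewrite author's own statement) =====
-- stated objective: alternative
-- what changed: Replaces A's two passes (a scan of CORRECT_ORDER probing the payload, then a leftover pass guarded by membership in the dict built so far) with a single bucket-sort pass over the payload that drops each item into the bucket of its CORRECT_ORDER position (one shared last bucket for unknown keys) and concatenates the buckets.
import Mathlib
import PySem

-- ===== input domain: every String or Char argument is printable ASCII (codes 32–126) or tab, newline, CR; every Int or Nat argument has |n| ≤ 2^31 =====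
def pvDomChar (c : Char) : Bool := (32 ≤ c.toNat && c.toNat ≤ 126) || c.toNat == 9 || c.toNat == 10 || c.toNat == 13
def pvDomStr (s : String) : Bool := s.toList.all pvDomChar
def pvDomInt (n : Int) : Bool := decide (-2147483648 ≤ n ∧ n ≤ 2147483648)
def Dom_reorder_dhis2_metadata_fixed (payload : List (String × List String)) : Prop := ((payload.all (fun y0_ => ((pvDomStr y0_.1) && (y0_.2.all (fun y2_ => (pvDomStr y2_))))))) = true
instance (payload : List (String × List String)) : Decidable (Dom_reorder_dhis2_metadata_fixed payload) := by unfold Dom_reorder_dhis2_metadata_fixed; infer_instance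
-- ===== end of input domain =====

-- B replaces A's two passes (scan of CORRECT_ORDER + leftover pass guarded by dict membership)
-- with a single bucket-sort pass over the payload; objective: alternative (same O(n) cost).
-- The dict argument/result are modelled as association lists in insertion order.

-- ===== PORT A =====
def pvCORRECT_ORDER : List String :=
  ["categoryOptions", "categories", "categoryCombos", "categoryOptionCombos", "dataElements", "dataSets"]

def reorder_dhis2_metadata_fixed (payload : List (String × List String)) : List (String × List String) :=
  let pd : PySem.Dict String (List String) := PySem.Dict.mk payload
  -- ordered = OrderedDict()
  let ordered : PySem.Dict String (List String) := PySem.Dict.empty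
  -- for key in CORRECT_ORDER: if key in payload: ordered[key] = payload[key]
  let ordered := pvCORRECT_ORDER.foldl (fun d key =>
    match pd.get? key with
    | some v => d.insert key v
    | none => d) ordered
  -- for key in payload: if key not in ordered: ordered[key] = payload[key]
  let ordered := payload.foldl (fun d kv =>
    if d.contains kv.1 then d
    else match pd.get? kv.1 with
      | some v => d.insert kv.1 v
      | none => d  -- unreachable: kv.1 is a key of payload
    ) ordered
  ordered.items

-- ===== PORT B =====
-- pos = {k: i for i, k in enumerate(CORRECT_ORDER)}
def pvPos : PySem.Dict String Int :=
  PySem.Dict.ofList ((PySem.List.enumerate pvCORRECT_ORDER).map (fun p => (p.2, p.1)))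

def reorder_dhis2_metadata_fixed_alt (payload : List (String × List String)) : List (String × List String) :=
  let sentinel : Int := pvCORRECT_ORDER.length
  -- buckets = [[] for _ in range(sentinel + 1)]
  let buckets : List (List (String × List String)) := List.replicate (pvCORRECT_ORDER.length + 1) []
  -- for key, value in payload.items(): buckets[pos.get(key, sentinel)].append((key, value))
  let buckets := payload.foldl (fun bs kv =>
    let i := (pvPos.getD kv.1 sentinel).toNat  -- the index is one of 0..6, so toNat is exact
    bs.set i (bs.getD i [] ++ [kv])) buckets
  -- OrderedDict(pair for bucket in buckets for pair in bucket)
  (PySem.Dict.ofList buckets.flatten).items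

-- ===== PRECONDITION & SPEC =====
-- Pre_ excludes association lists with duplicate keys: they denote no Python dict (a dict
-- literal silently collapses duplicates), so A's behaviour there is an artefact of the encoding.
def Pre_reorder_dhis2_metadata_fixed (payload : List (String × List String)) : Prop :=
  (payload.map (fun kv => kv.1)).Nodup
instance (payload : List (String × List String)) : Decidable (Pre_reorder_dhis2_metadata_fixed payload) := by unfold Pre_reorder_dhis2_metadata_fixed; infer_instance

def pvWitness_reorder_dhis2_metadata_fixed : (List (String × List String)) :=
  [("dataSets", ["ds1"]), ("organisationUnits", ["ou"]), ("categoryOptions", [])]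

def Spec_reorder_dhis2_metadata_fixed (payload : List (String × List String)) (out : List (String × List String)) : Prop := out = reorder_dhis2_metadata_fixed_alt payload
instance (payload : List (String × List String)) (out : List (String × List String)) : Decidable (Spec_reorder_dhis2_metadata_fixed payload out) := by unfold Spec_reorder_dhis2_metadata_fixed; infer_instance

-- ===== CLAIM (what is proved, stated in full; the proofs are below) =====
def Claim_equal_reorder_dhis2_metadata_fixed : Prop := ∀ (payload : List (String × List String)), Dom_reorder_dhis2_metadata_fixed payload → Pre_reorder_dhis2_metadata_fixed payload → Spec_reorder_dhis2_metadata_fixed payload (reorder_dhis2_metadata_fixed payload)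

-- ===== LEMMAS AND PROOFS =====

-- the first-match lookup both ports consult
def pvLk (payload : List (String × List String)) (k : String) : Option (List String) :=
  (PySem.Dict.mk payload).get? k

-- the common normal form: keys of CORRECT_ORDER first (payload value attached), then the rest
def pvK (payload : List (String × List String)) : List (String × List String) :=
  pvCORRECT_ORDER.filterMap (fun k => (pvLk payload k).map (fun v => (k, v)))

def pvU (payload : List (String × List String)) : List (String × List String) :=
  payload.filter (fun kv => !decide (kv.1 ∈ pvCORRECT_ORDER))

lemma pv_fm_cons {α β : Type} (f : α → Option β) (x : α) (l : List α) :
    List.filterMap f (x :: l) = (f x).toList ++ List.filterMap f l := by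
  cases h : f x <;> simp [h]

lemma pv_lookup_mem (payload : List (String × List String))
    (hnd : (payload.map (fun kv => kv.1)).Nodup) {kv : String × List String}
    (hkv : kv ∈ payload) : pvLk payload kv.1 = some kv.2 := by
  unfold pvLk
  apply PySem.Dict.get?_of_mem_items
  · show (kv.1, kv.2) ∈ payload
    simpa using hkv
  · simpa [PySem.Dict.keys] using hnd

lemma pv_passA1 (payload : List (String × List String)) (order : List String)
    (d : PySem.Dict String (List String)) (hnd : order.Nodup)
    (h : ∀ k ∈ order, d.contains k = false) :
    (order.foldl (fun d key =>
      match (PySem.Dict.mk payload).get? key with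
      | some v => d.insert key v
      | none => d) d).items
    = d.items ++ order.filterMap (fun k => (pvLk payload k).map (fun v => (k, v))) := by
  induction order generalizing d with
  | nil => simp
  | cons k t ih =>
    rw [List.foldl_cons, pv_fm_cons]
    cases hg : (PySem.Dict.mk payload).get? k with
    | none =>
      rw [ih d hnd.of_cons (fun k' hk' => h k' (List.mem_cons_of_mem _ hk'))]
      simp [pvLk, hg]
    | some v =>
      have hck : d.contains k = false := h k List.mem_cons_self
      have hct : ∀ k' ∈ t, (d.insert k v).contains k' = false := by
        intro k' hk'
        rw [PySem.Dict.contains_insert]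
        have hne : k' ≠ k := by
          rintro rfl
          exact (List.nodup_cons.mp hnd).1 hk'
        simp [hne, h k' (List.mem_cons_of_mem _ hk')]
      rw [ih (d.insert k v) hnd.of_cons hct,
        PySem.Dict.items_insert_of_not_contains d v hck]
      simp [pvLk, hg, List.append_assoc]

lemma pv_passA2 (payload : List (String × List String)) (l : List (String × List String))
    (d : PySem.Dict String (List String)) (hnd : (l.map (fun kv => kv.1)).Nodup)
    (hl : ∀ kv ∈ l, (PySem.Dict.mk payload).get? kv.1 = some kv.2) :
    (l.foldl (fun d kv =>
      if d.contains kv.1 then d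
      else
        match (PySem.Dict.mk payload).get? kv.1 with
        | some v => d.insert kv.1 v
        | none => d) d).items
    = d.items ++ l.filter (fun kv => !d.contains kv.1) := by
  induction l generalizing d with
  | nil => simp
  | cons kv t ih =>
    have hnd' : (t.map (fun kv => kv.1)).Nodup := (List.nodup_cons.mp (by simpa using hnd)).2
    have hhd : kv.1 ∉ t.map (fun kv => kv.1) := (List.nodup_cons.mp (by simpa using hnd)).1
    have hl' : ∀ kv' ∈ t, (PySem.Dict.mk payload).get? kv'.1 = some kv'.2 :=
      fun kv' hk' => hl kv' (List.mem_cons_of_mem _ hk')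
    rw [List.foldl_cons, List.filter_cons]
    by_cases hc : d.contains kv.1
    · simp only [hc, if_true, Bool.not_true, Bool.false_eq_true, if_false]
      exact ih d hnd' hl'
    · have hc' : d.contains kv.1 = false := by simpa using hc
      rw [hl kv List.mem_cons_self]
      simp only [hc', Bool.false_eq_true, if_false, Bool.not_false, if_true]
      have hfilt : t.filter (fun kv' => !(d.insert kv.1 kv.2).contains kv'.1)
          = t.filter (fun kv' => !d.contains kv'.1) := by
        apply List.filter_congr
        intro kv' hk'
        have hne : kv'.1 ≠ kv.1 := by
          intro e
          exact hhd (e ▸ List.mem_map_of_mem hk')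
        rw [PySem.Dict.contains_insert]
        simp [hne]
      rw [ih (d.insert kv.1 kv.2) hnd' hl', hfilt,
        PySem.Dict.items_insert_of_not_contains d kv.2 hc']
      simp [List.append_assoc]

lemma pv_map_fst_filterMap (g : String → Option (List String)) (order : List String) :
    (order.filterMap (fun k => (g k).map (fun v => (k, v)))).map (fun kv => kv.1)
    = order.filter (fun k => (g k).isSome) := by
  induction order with
  | nil => simp
  | cons k t ih => cases h : g k <;> simp [h, ih]

-- A's result in normal form
lemma pv_A_eq (payload : List (String × List String))
    (hnd : (payload.map (fun kv => kv.1)).Nodup) :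
    reorder_dhis2_metadata_fixed payload = pvK payload ++ pvU payload := by
  show (payload.foldl (fun d kv =>
      if d.contains kv.1 then d
      else
        match (PySem.Dict.mk payload).get? kv.1 with
        | some v => d.insert kv.1 v
        | none => d)
      (pvCORRECT_ORDER.foldl (fun d key =>
        match (PySem.Dict.mk payload).get? key with
        | some v => d.insert key v
        | none => d) PySem.Dict.empty)).items = pvK payload ++ pvU payload
  have h1 : (pvCORRECT_ORDER.foldl (fun d key =>
      match (PySem.Dict.mk payload).get? key with
      | some v => d.insert key v
      | none => d) PySem.Dict.empty).items = pvK payload := by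
    rw [pv_passA1 payload pvCORRECT_ORDER PySem.Dict.empty (by decide)
      (fun k _ => PySem.Dict.contains_empty k)]
    rfl
  rw [pv_passA2 payload payload _ hnd (fun kv hkv => pv_lookup_mem payload hnd hkv), h1]
  congr 1
  apply List.filter_congr
  intro kv hkv
  have hkeys : (pvCORRECT_ORDER.foldl (fun d key =>
      match (PySem.Dict.mk payload).get? key with
      | some v => d.insert key v
      | none => d) PySem.Dict.empty).keys
      = pvCORRECT_ORDER.filter (fun k => (pvLk payload k).isSome) := by
    show List.map _ _ = _
    rw [h1]
    exact pv_map_fst_filterMap _ _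
  rw [PySem.Dict.contains_eq_decide_mem_keys, hkeys]
  have hsome : (pvLk payload kv.1).isSome := by
    rw [pv_lookup_mem payload hnd hkv]; rfl
  simp [List.mem_filter, hsome]

-- the bucket index B computes, as a plain function
lemma pv_prio_eq (k : String) :
    (pvPos.getD k (pvCORRECT_ORDER.length : Int)).toNat
    = (if k = "categoryOptions" then 0 else if k = "categories" then 1
       else if k = "categoryCombos" then 2 else if k = "categoryOptionCombos" then 3
       else if k = "dataElements" then 4 else if k = "dataSets" then 5 else 6) := by
  have hpos : pvPos = PySem.Dict.mk [("categoryOptions", (0 : Int)), ("categories", 1),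
      ("categoryCombos", 2), ("categoryOptionCombos", 3), ("dataElements", 4), ("dataSets", 5)] := by
    rfl
  rw [PySem.Dict.getD_eq_get?_getD, hpos]
  simp only [PySem.Dict.get?_mk_cons, beq_iff_eq]
  split_ifs <;> subst_vars <;> first | rfl | simp_all

-- the bucket predicates, key by key
lemma pv_e0 (k : String) : ((pvPos.getD k (pvCORRECT_ORDER.length : Int)).toNat == 0)
    = (k == "categoryOptions") := by
  rw [pv_prio_eq]
  by_cases h : k = "categoryOptions"
  · subst h; decide
  · split_ifs <;> simp [h]

lemma pv_e1 (k : String) : ((pvPos.getD k (pvCORRECT_ORDER.length : Int)).toNat == 1)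
    = (k == "categories") := by
  rw [pv_prio_eq]
  by_cases h : k = "categories"
  · subst h; simp
  · split_ifs <;> simp [h]

lemma pv_e2 (k : String) : ((pvPos.getD k (pvCORRECT_ORDER.length : Int)).toNat == 2)
    = (k == "categoryCombos") := by
  rw [pv_prio_eq]
  by_cases h : k = "categoryCombos"
  · subst h; simp
  · split_ifs <;> simp [h]

lemma pv_e3 (k : String) : ((pvPos.getD k (pvCORRECT_ORDER.length : Int)).toNat == 3)
    = (k == "categoryOptionCombos") := by
  rw [pv_prio_eq]
  by_cases h : k = "categoryOptionCombos"
  · subst h; simp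
  · split_ifs <;> simp [h]

lemma pv_e4 (k : String) : ((pvPos.getD k (pvCORRECT_ORDER.length : Int)).toNat == 4)
    = (k == "dataElements") := by
  rw [pv_prio_eq]
  by_cases h : k = "dataElements"
  · subst h; simp
  · split_ifs <;> simp [h]

lemma pv_e5 (k : String) : ((pvPos.getD k (pvCORRECT_ORDER.length : Int)).toNat == 5)
    = (k == "dataSets") := by
  rw [pv_prio_eq]
  by_cases h : k = "dataSets"
  · subst h; simp
  · split_ifs <;> simp [h]

lemma pv_e6 (k : String) : ((pvPos.getD k (pvCORRECT_ORDER.length : Int)).toNat == 6)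
    = (!decide (k ∈ pvCORRECT_ORDER)) := by
  rw [pv_prio_eq]
  by_cases h : k ∈ pvCORRECT_ORDER
  · simp only [pvCORRECT_ORDER, List.mem_cons, List.not_mem_nil, or_false] at h
    rcases h with h | h | h | h | h | h <;> subst h <;> decide
  · have := h
    simp only [pvCORRECT_ORDER, List.mem_cons, List.not_mem_nil, or_false, not_or] at this
    obtain ⟨h0, h1, h2, h3, h4, h5⟩ := this
    simp [h0, h1, h2, h3, h4, h5, h]

lemma pv_bfold_idx (l : List (String × List String)) (bs : List (List (String × List String)))
    (hall : ∀ kv ∈ l, (pvPos.getD kv.1 (pvCORRECT_ORDER.length : Int)).toNat < bs.length)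
    (i : Nat) :
    (l.foldl (fun bs kv =>
      bs.set (pvPos.getD kv.1 (pvCORRECT_ORDER.length : Int)).toNat
        (bs.getD (pvPos.getD kv.1 (pvCORRECT_ORDER.length : Int)).toNat [] ++ [kv])) bs)[i]?
    = bs[i]?.map (fun b => b ++ l.filter (fun kv =>
        (pvPos.getD kv.1 (pvCORRECT_ORDER.length : Int)).toNat == i)) := by
  induction l generalizing bs with
  | nil => simp
  | cons kv t ih =>
    have hp : (pvPos.getD kv.1 (pvCORRECT_ORDER.length : Int)).toNat < bs.length :=
      hall kv List.mem_cons_self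
    rw [List.foldl_cons, ih _ (by
      intro kv' hk'
      simpa using hall kv' (List.mem_cons_of_mem _ hk')), List.getElem?_set, List.filter_cons]
    by_cases hip : (pvPos.getD kv.1 (pvCORRECT_ORDER.length : Int)).toNat = i
    · obtain ⟨b, hb⟩ : ∃ b, bs[i]? = some b := by
        rw [← hip]
        exact ⟨bs[(pvPos.getD kv.1 (pvCORRECT_ORDER.length : Int)).toNat],
          List.getElem?_eq_getElem hp⟩
      simp [hip, hip ▸ hp, List.getD_eq_getElem?_getD, List.append_assoc]
    · simp [hip]

lemma pv_filter_eq_key (payload : List (String × List String))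
    (hnd : (payload.map (fun kv => kv.1)).Nodup) (c : String) :
    payload.filter (fun kv => kv.1 == c) = ((pvLk payload c).map (fun v => (c, v))).toList := by
  induction payload with
  | nil =>
    have h0 : pvLk [] c = none := rfl
    simp [h0]
  | cons kv t ih =>
    obtain ⟨k0, v0⟩ := kv
    have hnd' : (t.map (fun kv => kv.1)).Nodup := (List.nodup_cons.mp (by simpa using hnd)).2
    have hhd : k0 ∉ t.map (fun kv => kv.1) := (List.nodup_cons.mp (by simpa using hnd)).1
    have hstep : pvLk ((k0, v0) :: t) c = if k0 == c then some v0 else pvLk t c := by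
      unfold pvLk
      exact PySem.Dict.get?_mk_cons _ _ _ _
    rw [List.filter_cons, hstep]
    by_cases h : k0 = c
    · subst h
      have hnil : t.filter (fun kv => kv.1 == k0) = [] := by
        rw [List.filter_eq_nil_iff]
        intro kv' hk'
        simp only [beq_iff_eq]
        intro e
        exact hhd (e ▸ List.mem_map_of_mem hk')
      simp [hnil]
    · have h' : (k0 == c) = false := by simpa using h
      simp only [h', Bool.false_eq_true, if_false]
      simpa [h'] using ih hnd'

-- B's result in normal form
set_option maxHeartbeats 1000000 in
lemma pv_B_eq (payload : List (String × List String))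
    (hnd : (payload.map (fun kv => kv.1)).Nodup) :
    reorder_dhis2_metadata_fixed_alt payload = pvK payload ++ pvU payload := by
  show (PySem.Dict.ofList (payload.foldl (fun bs kv =>
      bs.set (pvPos.getD kv.1 (pvCORRECT_ORDER.length : Int)).toNat
        (bs.getD (pvPos.getD kv.1 (pvCORRECT_ORDER.length : Int)).toNat [] ++ [kv]))
      (List.replicate (pvCORRECT_ORDER.length + 1) [])).flatten).items = pvK payload ++ pvU payload
  have hall : ∀ kv ∈ payload, (pvPos.getD kv.1 (pvCORRECT_ORDER.length : Int)).toNat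
      < (List.replicate (pvCORRECT_ORDER.length + 1) ([] : List (String × List String))).length := by
    intro kv _
    rw [pv_prio_eq]
    simp only [List.length_replicate]
    split_ifs <;> decide
  have hB : (payload.foldl (fun bs kv =>
      bs.set (pvPos.getD kv.1 (pvCORRECT_ORDER.length : Int)).toNat
        (bs.getD (pvPos.getD kv.1 (pvCORRECT_ORDER.length : Int)).toNat [] ++ [kv]))
      (List.replicate (pvCORRECT_ORDER.length + 1) []))
      = [0, 1, 2, 3, 4, 5, 6].map (fun i => payload.filter (fun kv =>
          (pvPos.getD kv.1 (pvCORRECT_ORDER.length : Int)).toNat == i)) := by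
    apply List.ext_getElem?
    intro i
    rw [pv_bfold_idx payload _ hall i, List.getElem?_replicate]
    rcases i with _ | _ | _ | _ | _ | _ | _ | i
    · simp [pvCORRECT_ORDER]
    · simp [pvCORRECT_ORDER]
    · simp [pvCORRECT_ORDER]
    · simp [pvCORRECT_ORDER]
    · simp [pvCORRECT_ORDER]
    · simp [pvCORRECT_ORDER]
    · simp [pvCORRECT_ORDER]
    · rw [if_neg (by simp [pvCORRECT_ORDER])]
      simp
  rw [hB]
  have hKx : pvK payload
      = ((pvLk payload "categoryOptions").map (fun v => ("categoryOptions", v))).toList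
        ++ (((pvLk payload "categories").map (fun v => ("categories", v))).toList
        ++ (((pvLk payload "categoryCombos").map (fun v => ("categoryCombos", v))).toList
        ++ (((pvLk payload "categoryOptionCombos").map (fun v => ("categoryOptionCombos", v))).toList
        ++ (((pvLk payload "dataElements").map (fun v => ("dataElements", v))).toList
        ++ (((pvLk payload "dataSets").map (fun v => ("dataSets", v))).toList ++ []))))) := by
    simp only [pvK, pvCORRECT_ORDER, pv_fm_cons, List.filterMap_nil]
  have hflat : ([0, 1, 2, 3, 4, 5, 6].map (fun i => payload.filter (fun kv =>
        (pvPos.getD kv.1 (pvCORRECT_ORDER.length : Int)).toNat == i))).flatten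
      = pvK payload ++ pvU payload := by
    simp only [List.map_cons, List.map_nil, List.flatten_cons, List.flatten_nil, List.append_nil]
    simp only [pv_e0, pv_e1, pv_e2, pv_e3, pv_e4, pv_e5, pv_e6]
    rw [pv_filter_eq_key payload hnd "categoryOptions", pv_filter_eq_key payload hnd "categories",
      pv_filter_eq_key payload hnd "categoryCombos",
      pv_filter_eq_key payload hnd "categoryOptionCombos",
      pv_filter_eq_key payload hnd "dataElements", pv_filter_eq_key payload hnd "dataSets",
      hKx]
    simp [pvU, List.append_assoc]
  rw [hflat]
  have hnodK : ((pvK payload ++ pvU payload).map (fun kv => kv.1)).Nodup := by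
    rw [List.map_append]
    have hK1 : (pvK payload).map (fun kv => kv.1)
        = pvCORRECT_ORDER.filter (fun k => (pvLk payload k).isSome) := pv_map_fst_filterMap _ _
    have hU1 : (pvU payload).map (fun kv => kv.1)
        = (payload.map (fun kv => kv.1)).filter (fun k => !decide (k ∈ pvCORRECT_ORDER)) := by
      unfold pvU
      rw [List.filter_map]
      rfl
    rw [hK1, hU1]
    apply List.Nodup.append
    · exact (by decide : pvCORRECT_ORDER.Nodup).filter _
    · exact hnd.filter _
    · intro a ha hb
      rw [List.mem_filter] at ha hb
      simp at hb
      exact hb.2 ha.1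
  show (List.foldl (fun acc p => acc.insert p.1 p.2) PySem.Dict.empty
      (pvK payload ++ pvU payload)).items = pvK payload ++ pvU payload
  rw [PySem.Dict.items_foldl_insert_fresh (pvK payload ++ pvU payload)
    (fun p => p.1) (fun p => p.2) PySem.Dict.empty
    (fun a _ => PySem.Dict.contains_empty _) hnodK]
  simp
  rfl

-- ===== VERDICT (by name: the statement is the Claim_ definition above) =====
theorem reorder_dhis2_metadata_fixed_spec : Claim_equal_reorder_dhis2_metadata_fixed := by
  intro payload _ hpre
  unfold Spec_reorder_dhis2_metadata_fixed
  rw [pv_A_eq payload hpre, pv_B_eq payload hpre]
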